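-- pv_equiv track=rewrite | github.com/alegorecki2405/Coding-challanges | 19.py | cast_out_nines
-- ===== SOURCE A (Python) =====
-- def cast_out_nines(a, b, r):
--     def dr(x):
--         xx=0
--         for i in x:
--             xx += int(i)
--         if xx >=10:
--             return dr(list(str(xx)))
--         return xx
--     a1 = list(str(a))
--     b1 = list(str(b))
--     r1 = list(str(r))
--     ax = dr(a1)
--     bx = dr(b1)
--     rx = dr(r1)
--     zx = dr(list(str(ax*bx)))
--
--     if a*b == r and zx == rx:
--         return str(ax)+","+str(bx)+","+str(rx)+","+str(zx)+" = Correct!"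
--     elif zx == rx:
--         return str(ax)+","+str(bx)+","+str(rx)+","+str(zx)+" = False positive!"
--     else:
--         return str(ax)+","+str(bx)+","+str(rx)+","+str(zx)+" = Wrong!"
-- ===== SOURCE B (Python) =====
-- def cast_out_nines(a, b, r):
--     # closed-form digital root instead of recursive digit summing
--     def dr(n):
--         return 0 if n == 0 else 1 + (n - 1) % 9
--     ax, bx, rx = dr(a), dr(b), dr(r)
--     zx = dr(ax * bx)
--     head = "%d,%d,%d,%d" % (ax, bx, rx, zx)
--     if zx == rx:
--         return head + (" = Correct!" if a * b == r else " = False positive!")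
--     return head + " = Wrong!"
-- ===== Notes on version B (the rewrite author's own statement) =====
-- stated objective: simpler
-- what changed: Replaces the recursive string-digit-summing dr with the closed-form digital root 0 if n==0 else 1+(n-1)%9 computed directly on the integers, so no string/digit iteration remains.
import Mathlib
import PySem

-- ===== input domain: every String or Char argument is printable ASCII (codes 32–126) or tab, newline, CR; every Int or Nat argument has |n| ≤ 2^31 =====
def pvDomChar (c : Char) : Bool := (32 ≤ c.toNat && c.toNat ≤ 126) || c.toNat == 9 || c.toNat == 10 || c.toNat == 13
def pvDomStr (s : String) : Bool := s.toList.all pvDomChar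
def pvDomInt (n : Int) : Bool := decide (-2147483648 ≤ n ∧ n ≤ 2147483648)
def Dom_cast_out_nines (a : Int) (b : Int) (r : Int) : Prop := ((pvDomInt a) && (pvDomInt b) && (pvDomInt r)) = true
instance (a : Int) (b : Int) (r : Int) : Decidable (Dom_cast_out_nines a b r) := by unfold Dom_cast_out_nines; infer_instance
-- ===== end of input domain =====

-- B replaces A's recursive string-digit-summing with the closed-form digital root
-- 0 if n == 0 else 1 + (n - 1) % 9, computed directly on the integers (objective: simpler).

-- ===== PORT A =====
-- int(ch) for one character: exact for the digit characters '0'..'9', the only characters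
-- dr ever sees under Pre_ (digits of str of a nonnegative int); on other characters Python
-- raises ValueError, which Pre_ excludes.
def pyDigitVal (c : Char) : Int := (c.toNat : Int) - 48

-- the accumulator loop 'xx = 0; for i in x: xx += int(i)'
def drSum (x : List Char) : Int := x.foldl (fun xx i => xx + pyDigitVal i) 0

-- the three lemmas below are cited by drA's decreasing_by, so they stay above the port
lemma drSum_toDigitsCore (f : Nat) : ∀ (n : Nat) (acc : List Char), n < f →
    drSum (Nat.toDigitsCore 10 f n acc) = ((Nat.digits 10 n).sum : Int) + drSum acc := by
  induction f with
  | zero => intro n acc h; omega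
  | succ f ih =>
    intro n acc h
    rw [Nat.toDigitsCore]
    have hd : pyDigitVal (Nat.digitChar (n % 10)) = ((n % 10 : Nat) : Int) := by
      have h10 : n % 10 < 10 := Nat.mod_lt _ (by omega)
      interval_cases h : n % 10 <;> simp [pyDigitVal, Nat.digitChar]
    have hcons : ∀ (c : Char) (l : List Char), drSum (c :: l) = pyDigitVal c + drSum l := by
      intro c l
      simp [drSum, PySem.List.foldl_add]
    by_cases h0 : n / 10 = 0
    · have hn : n < 10 := by omega
      rw [if_pos h0, hcons, hd]
      rcases Nat.eq_zero_or_pos n with h' | h'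
      · subst h'; simp
      · rw [Nat.digits_def' (by omega : (1:Nat) < 10) h', Nat.div_eq_of_lt hn]
        simp [Nat.mod_eq_of_lt hn]
    · rw [if_neg h0]
      have hlt : n / 10 < f := by
        have := Nat.div_lt_self (by omega : 0 < n) (by omega : 1 < 10)
        omega
      rw [ih (n / 10) _ hlt, hcons, hd,
        Nat.digits_def' (by omega : (1:Nat) < 10) (by omega : 0 < n)]
      simp only [List.sum_cons]
      push_cast
      ring

lemma drSum_toChars (n : Int) (h : 0 ≤ n) :
    drSum (PySem.Int.toStr n).toList = ((Nat.digits 10 n.toNat).sum : Int) := by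
  rw [PySem.Int.toList_toStr]
  rw [show PySem.Int.toChars n = Nat.toDigits 10 n.toNat by
    simp [PySem.Int.toChars, not_lt.mpr h]]
  rw [Nat.toDigits, drSum_toDigitsCore _ _ _ (Nat.lt_succ_self _)]
  simp [drSum]

lemma digits_sum_lt (n : Nat) (h : 10 ≤ n) : (Nat.digits 10 n).sum < n := by
  rw [Nat.digits_def' (by omega : (1:Nat) < 10) (by omega : 0 < n)]
  have h1 := Nat.digit_sum_le 10 (n / 10)
  have h2 : n % 10 < 10 := Nat.mod_lt _ (by omega)
  have h3 : 10 * (n / 10) + n % 10 = n := Nat.div_add_mod n 10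
  simp only [List.sum_cons]
  omega

-- A's recursive dr, on the digit-character list
def drA (x : List Char) : Int :=
  let xx := drSum x
  if 10 ≤ xx then drA (PySem.Int.toStr xx).toList else xx
termination_by (drSum x).toNat
decreasing_by
  have h0 : (0:Int) ≤ drSum x := by omega
  rw [drSum_toChars _ h0]
  have h10 : 10 ≤ (drSum x).toNat := by omega
  have := digits_sum_lt (drSum x).toNat h10
  omega

def cast_out_nines (a : Int) (b : Int) (r : Int) : String :=
  let a1 := (PySem.Int.toStr a).toList
  let b1 := (PySem.Int.toStr b).toList
  let r1 := (PySem.Int.toStr r).toList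
  let ax := drA a1
  let bx := drA b1
  let rx := drA r1
  let zx := drA (PySem.Int.toStr (ax * bx)).toList
  if a * b = r ∧ zx = rx then
    PySem.Int.toStr ax ++ "," ++ PySem.Int.toStr bx ++ "," ++ PySem.Int.toStr rx ++ "," ++ PySem.Int.toStr zx ++ " = Correct!"
  else if zx = rx then
    PySem.Int.toStr ax ++ "," ++ PySem.Int.toStr bx ++ "," ++ PySem.Int.toStr rx ++ "," ++ PySem.Int.toStr zx ++ " = False positive!"
  else
    PySem.Int.toStr ax ++ "," ++ PySem.Int.toStr bx ++ "," ++ PySem.Int.toStr rx ++ "," ++ PySem.Int.toStr zx ++ " = Wrong!"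

-- ===== PORT B =====
-- closed-form digital root: 0 if n == 0 else 1 + (n - 1) % 9
def drB (n : Int) : Int := if n = 0 then 0 else 1 + PySem.Int.mod (n - 1) 9

def cast_out_nines_alt (a : Int) (b : Int) (r : Int) : String :=
  let ax := drB a
  let bx := drB b
  let rx := drB r
  let zx := drB (ax * bx)
  let head := PySem.Int.toStr ax ++ "," ++ PySem.Int.toStr bx ++ "," ++ PySem.Int.toStr rx ++ "," ++ PySem.Int.toStr zx
  if zx = rx then
    head ++ (if a * b = r then " = Correct!" else " = False positive!")
  else
    head ++ " = Wrong!"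

-- ===== PRECONDITION & SPEC =====
-- Pre_ excludes negative arguments: there str(n) starts with '-' and A's dr raises
-- ValueError on int('-').
def Pre_cast_out_nines (a : Int) (b : Int) (r : Int) : Prop := 0 ≤ a ∧ 0 ≤ b ∧ 0 ≤ r
instance (a : Int) (b : Int) (r : Int) : Decidable (Pre_cast_out_nines a b r) := by unfold Pre_cast_out_nines; infer_instance

def pvWitness_cast_out_nines : Int × Int × Int := (6, 7, 42)

def Spec_cast_out_nines (a : Int) (b : Int) (r : Int) (out : String) : Prop := out = cast_out_nines_alt a b r
instance (a : Int) (b : Int) (r : Int) (out : String) : Decidable (Spec_cast_out_nines a b r out) := by unfold Spec_cast_out_nines; infer_instance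

-- ===== CLAIM (what is proved, stated in full; the proofs are below) =====
def Claim_equal_cast_out_nines : Prop := ∀ (a : Int) (b : Int) (r : Int), Dom_cast_out_nines a b r → Pre_cast_out_nines a b r → Spec_cast_out_nines a b r (cast_out_nines a b r)


-- ===== LEMMAS AND PROOFS =====

lemma digits_sum_pos (n : Nat) (h : n ≠ 0) : 0 < (Nat.digits 10 n).sum := by
  induction n using Nat.strong_induction_on with
  | _ n ih =>
    rw [Nat.digits_def' (by omega : (1:Nat) < 10) (by omega : 0 < n)]
    simp only [List.sum_cons]
    by_cases h1 : n % 10 = 0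
    · have h2 : n / 10 ≠ 0 := by omega
      have := ih (n / 10) (Nat.div_lt_self (by omega) (by omega)) h2
      omega
    · omega

lemma drB_nonneg (n : Int) : 0 ≤ drB n := by
  unfold drB
  split_ifs with h
  · omega
  · have := PySem.Int.mod_nonneg (n - 1) (by omega : (0:Int) < 9)
    omega

-- drB computed from n's Nat digit sum: the digital root
lemma drB_eq_of_modEq (s m : Nat) (hs1 : 1 ≤ s) (hs9 : s ≤ 9) (hm : 0 < m)
    (hmod : s % 9 = m % 9) : (s : Int) = drB (m : Int) := by
  unfold drB
  rw [if_neg (by omega : ¬ ((m:Int) = 0)),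
    PySem.Int.mod_eq_emod_of_pos (by omega : (0:Int) < 9)]
  have : (s : Int) % 9 = (m : Int) % 9 := by omega
  omega

lemma drA_toStr_nat (m : Nat) : drA (PySem.Int.toStr (m : Int)).toList = drB (m : Int) := by
  induction m using Nat.strong_induction_on with
  | _ m ih =>
    rw [drA]
    have hsum : drSum (PySem.Int.toStr (m : Int)).toList = ((Nat.digits 10 m).sum : Int) := by
      rw [drSum_toChars _ (by omega : (0:Int) ≤ (m:Int))]
      simp
    simp only [hsum]
    set s : Nat := (Nat.digits 10 m).sum with hs
    have hle : s ≤ m := Nat.digit_sum_le 10 m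
    have hmodeq : m % 9 = s % 9 := Nat.modEq_nine_digits_sum m
    by_cases h10 : (10 : Int) ≤ (s : Int)
    · rw [if_pos h10]
      have hlt : s < m := by
        have := digits_sum_lt m (by omega : 10 ≤ m)
        omega
      rw [ih s hlt]
      -- drB s = drB m: both positive and congruent mod 9
      unfold drB
      rw [if_neg (by omega : ¬ ((s:Int) = 0)), if_neg (by omega : ¬ ((m:Int) = 0)),
        PySem.Int.mod_eq_emod_of_pos (by omega : (0:Int) < 9),
        PySem.Int.mod_eq_emod_of_pos (by omega : (0:Int) < 9)]
      have : (s : Int) % 9 = (m : Int) % 9 := by omega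
      omega
    · rw [if_neg h10]
      rcases Nat.eq_zero_or_pos m with hm0 | hm0
      · subst hm0
        simp only [hs]
        simp [drB]
      · exact drB_eq_of_modEq s m (digits_sum_pos m (by omega)) (by omega) hm0 (by omega)

lemma drA_toStr_int (n : Int) (h : 0 ≤ n) : drA (PySem.Int.toStr n).toList = drB n := by
  obtain ⟨m, rfl⟩ := Int.eq_ofNat_of_zero_le h
  exact drA_toStr_nat m

-- ===== VERDICT (by name: the statement is the Claim_ definition above) =====
theorem cast_out_nines_spec : Claim_equal_cast_out_nines := by
  intro a b r _ ⟨ha, hb, hr⟩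
  unfold Spec_cast_out_nines cast_out_nines cast_out_nines_alt
  simp only [drA_toStr_int a ha, drA_toStr_int b hb, drA_toStr_int r hr,
    drA_toStr_int _ (mul_nonneg (drB_nonneg a) (drB_nonneg b))]
  split_ifs <;> first | rfl | tauto
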